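-- pv_equiv track=rewrite | github.com/dariusss23/LFA | NFA/NFA.py | validate_string
-- ===== SOURCE A (Python) =====
-- def get_epsilon_reachable_states(states, transitions):
--     reachable_states=set(states)
--     changed=True
--
--     while changed:
--         changed=False
--         for state in list(reachable_states):
--             for next_state in transitions.get((state, "EPSILON"), []):
--                 if next_state not in reachable_states:
--                     reachable_states.add(next_state)
--                     changed=True
--
--     return reachable_states
--
-- def validate_string(input_string, start_state, accept_states, transitions):
--     current_states=get_epsilon_reachable_states([start_state], transitions)
--
--     for symbol in input_string:
--         next_states=set()
--         for state in current_states: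
--             for target in transitions.get((state, symbol), []):
--                 next_states.add(target)
--         current_states=get_epsilon_reachable_states(next_states, transitions)
--
--     return any(state in accept_states for state in current_states)
-- ===== SOURCE B (Python) =====
-- def validate_string(input_string, start_state, accept_states, transitions):
--     def closure(states):
--         # epsilon-closure by DFS worklist: each state is expanded exactly once
--         seen = set(states)
--         stack = list(seen)
--         while stack:
--             state = stack.pop()
--             for nxt in transitions.get((state, "EPSILON"), []):
--                 if nxt not in seen:
--                     seen.add(nxt)
--                     stack.append(nxt)
--         return seen
--
--     current = closure([start_state])
--     for symbol in input_string:
--         moved = set()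
--         for state in current:
--             moved.update(transitions.get((state, symbol), []))
--         current = closure(moved)
--     return any(state in current for state in accept_states)
-- ===== Notes on version B (the rewrite author's own statement) =====
-- stated objective: alternative
-- what changed: epsilon-closure is computed by a DFS worklist that expands each state exactly once, instead of A's repeated full rescans of the growing set until a pass adds nothing; the acceptance test iterates accept_states against the final set instead of the reverse.
import Mathlib
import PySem

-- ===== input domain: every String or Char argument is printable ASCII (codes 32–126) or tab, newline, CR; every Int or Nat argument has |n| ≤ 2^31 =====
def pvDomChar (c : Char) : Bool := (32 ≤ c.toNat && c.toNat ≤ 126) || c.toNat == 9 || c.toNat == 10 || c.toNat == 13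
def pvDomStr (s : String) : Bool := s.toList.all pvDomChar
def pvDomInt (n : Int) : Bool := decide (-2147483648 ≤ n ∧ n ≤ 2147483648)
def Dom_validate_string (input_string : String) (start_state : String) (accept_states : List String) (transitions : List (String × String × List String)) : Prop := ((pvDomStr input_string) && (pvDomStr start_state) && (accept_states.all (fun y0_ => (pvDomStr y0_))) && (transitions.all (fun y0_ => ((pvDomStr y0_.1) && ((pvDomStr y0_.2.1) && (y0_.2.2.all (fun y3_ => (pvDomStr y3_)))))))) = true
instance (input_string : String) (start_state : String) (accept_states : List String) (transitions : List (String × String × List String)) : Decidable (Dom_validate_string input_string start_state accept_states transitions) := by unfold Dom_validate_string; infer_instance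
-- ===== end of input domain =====

-- B computes each epsilon-closure with a DFS worklist (each state expanded once) instead of A's
-- fixpoint rescans; same accepted/rejected verdict, proved equal on the whole domain.


-- transitions.get((state, symbol), []): first-match lookup in the association list (shared primitive)
def tget (ts : List (String × String × List String)) (s sym : String) : List String :=
  match ts with
  | [] => []
  | (a, b, v) :: r => if a = s ∧ b = sym then v else tget r s sym

-- totality fuel for both closure loops: more than the number of transition targets (a guard only;
-- the proofs show it is never exhausted)
def pvFuel (ts : List (String × String × List String)) : Nat :=
  (ts.flatMap (fun t => t.2.2)).length + 1

-- ===== PORT A =====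
-- one 'while changed' pass: for state in list(reachable): for next in eps: if not in: add, changed=True
def passA (ts : List (String × String × List String)) (R : List String) : List String × Bool :=
  R.foldl
    (fun acc st =>
      (tget ts st "EPSILON").foldl
        (fun acc2 nxt => if nxt ∈ acc2.1 then acc2 else (acc2.1 ++ [nxt], true)) acc)
    (R, false)

def closeA (ts : List (String × String × List String)) : Nat → List String → List String
  | 0, R => R
  | fuel+1, R =>
    let p := passA ts R
    if p.2 then closeA ts fuel p.1 else p.1

def validate_string (input_string : String) (start_state : String) (accept_states : List String) (transitions : List (String × String × List String)) : Bool :=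
  let current0 := closeA transitions (pvFuel transitions) (PySem.Set.ofList [start_state])
  let current := input_string.toList.foldl
    (fun cur c =>
      let nxt := cur.foldl
        (fun ns s =>
          (tget transitions s (Char.toString c)).foldl (fun ns t => PySem.Set.add ns t) ns)
        ([] : List String)
      closeA transitions (pvFuel transitions) (PySem.Set.ofList nxt))
    current0
  current.any (fun s => accept_states.contains s)

-- ===== PORT B =====
-- DFS worklist closure: pop the stack's last element, push unseen epsilon successors
def closeB (ts : List (String × String × List String)) : Nat → List String → List String → List String
  | 0, _, seen => seen
  | fuel+1, stack, seen =>
    match stack.getLast? with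
    | none => seen
    | some s =>
      let p := (tget ts s "EPSILON").foldl
        (fun (q : List String × List String) t =>
          if t ∈ q.2 then q else (q.1 ++ [t], q.2 ++ [t]))
        (stack.dropLast, seen)
      closeB ts fuel p.1 p.2

def validate_string_alt (input_string : String) (start_state : String) (accept_states : List String) (transitions : List (String × String × List String)) : Bool :=
  let seen0 := PySem.Set.ofList [start_state]
  let current0 := closeB transitions (seen0.length + pvFuel transitions) seen0 seen0
  let current := input_string.toList.foldl
    (fun cur c =>
      let moved := cur.foldl
        (fun m s => PySem.Set.update m (tget transitions s (Char.toString c)))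
        ([] : List String)
      closeB transitions (moved.length + pvFuel transitions) moved moved)
    current0
  accept_states.any (fun s => current.contains s)

-- ===== PRECONDITION & SPEC =====
def Spec_validate_string (input_string : String) (start_state : String) (accept_states : List String) (transitions : List (String × String × List String)) (out : Bool) : Prop := out = validate_string_alt input_string start_state accept_states transitions
instance (input_string : String) (start_state : String) (accept_states : List String) (transitions : List (String × String × List String)) (out : Bool) : Decidable (Spec_validate_string input_string start_state accept_states transitions out) := by unfold Spec_validate_string; infer_instance

-- ===== CLAIM (what is proved, stated in full; the proofs are below) =====
def Claim_equal_validate_string : Prop := ∀ (input_string : String) (start_state : String) (accept_states : List String) (transitions : List (String × String × List String)), Dom_validate_string input_string start_state accept_states transitions → Spec_validate_string input_string start_state accept_states transitions (validate_string input_string start_state accept_states transitions)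

-- ===== LEMMAS AND PROOFS =====

def stepA1 : (List String × Bool) → String → (List String × Bool) :=
  fun acc2 nxt => if nxt ∈ acc2.1 then acc2 else (acc2.1 ++ [nxt], true)

theorem fold1_spec (ys : List String) : ∀ (acc : List String × Bool), ∃ d : List String,
    (ys.foldl stepA1 acc).1 = acc.1 ++ d ∧
    (ys.foldl stepA1 acc).2 = (acc.2 || !d.isEmpty) ∧
    (∀ x ∈ d, x ∈ ys ∧ x ∉ acc.1) ∧
    (∀ t ∈ ys, t ∈ (ys.foldl stepA1 acc).1) ∧
    (acc.1.Nodup → (ys.foldl stepA1 acc).1.Nodup) := by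
  induction ys with
  | nil => intro acc; exact ⟨[], by simp, by simp, by simp, by simp, by simp⟩
  | cons y ys ih =>
    intro acc
    simp only [List.foldl_cons]
    by_cases hy : y ∈ acc.1
    · have hstep : stepA1 acc y = acc := by simp [stepA1, hy]
      rw [hstep]
      obtain ⟨d, h1, h2, h3, h4, h5⟩ := ih acc
      refine ⟨d, h1, h2, fun x hx => ⟨List.mem_cons_of_mem _ (h3 x hx).1, (h3 x hx).2⟩, ?_, h5⟩
      intro t ht
      rcases List.mem_cons.mp ht with rfl | ht
      · rw [h1]; exact List.mem_append_left _ hy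
      · exact h4 t ht
    · have hstep : stepA1 acc y = (acc.1 ++ [y], true) := by simp [stepA1, hy]
      rw [hstep]
      obtain ⟨d, h1, h2, h3, h4, h5⟩ := ih (acc.1 ++ [y], true)
      refine ⟨y :: d, ?_, ?_, ?_, ?_, ?_⟩
      · rw [h1]; simp
      · rw [h2]; simp
      · intro x hx
        rcases List.mem_cons.mp hx with rfl | hx
        · exact ⟨List.mem_cons_self, hy⟩
        · have := h3 x hx
          exact ⟨List.mem_cons_of_mem _ this.1, fun hc => this.2 (List.mem_append_left _ hc)⟩
      · intro t ht
        rcases List.mem_cons.mp ht with rfl | ht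
        · rw [h1]; exact List.mem_append_left _ (List.mem_append_right _ List.mem_cons_self)
        · exact h4 t ht
      · intro hnd
        exact h5 (by simp [List.nodup_append, hnd]; exact fun a ha hc => hy (hc ▸ ha))

def stepB1 : (List String × List String) → String → (List String × List String) :=
  fun q t => if t ∈ q.2 then q else (q.1 ++ [t], q.2 ++ [t])

theorem fold2_spec (ys : List String) : ∀ (q : List String × List String), ∃ d : List String,
    (ys.foldl stepB1 q).1 = q.1 ++ d ∧
    (ys.foldl stepB1 q).2 = q.2 ++ d ∧
    (∀ x ∈ d, x ∈ ys ∧ x ∉ q.2) ∧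
    (∀ t ∈ ys, t ∈ (ys.foldl stepB1 q).2) ∧
    (q.2.Nodup → (ys.foldl stepB1 q).2.Nodup) := by
  induction ys with
  | nil => intro q; exact ⟨[], by simp, by simp, by simp, by simp, by simp⟩
  | cons y ys ih =>
    intro q
    simp only [List.foldl_cons]
    by_cases hy : y ∈ q.2
    · have hstep : stepB1 q y = q := by simp [stepB1, hy]
      rw [hstep]
      obtain ⟨d, h1, h2, h3, h4, h5⟩ := ih q
      refine ⟨d, h1, h2, fun x hx => ⟨List.mem_cons_of_mem _ (h3 x hx).1, (h3 x hx).2⟩, ?_, h5⟩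
      intro t ht
      rcases List.mem_cons.mp ht with rfl | ht
      · rw [h2]; exact List.mem_append_left _ hy
      · exact h4 t ht
    · have hstep : stepB1 q y = (q.1 ++ [y], q.2 ++ [y]) := by simp [stepB1, hy]
      rw [hstep]
      obtain ⟨d, h1, h2, h3, h4, h5⟩ := ih (q.1 ++ [y], q.2 ++ [y])
      refine ⟨y :: d, ?_, ?_, ?_, ?_, ?_⟩
      · rw [h1]; simp
      · rw [h2]; simp
      · intro x hx
        rcases List.mem_cons.mp hx with rfl | hx
        · exact ⟨List.mem_cons_self, hy⟩
        · have := h3 x hx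
          exact ⟨List.mem_cons_of_mem _ this.1, fun hc => this.2 (List.mem_append_left _ hc)⟩
      · intro t ht
        rcases List.mem_cons.mp ht with rfl | ht
        · rw [h2]; exact List.mem_append_left _ (List.mem_append_right _ List.mem_cons_self)
        · exact h4 t ht
      · intro hnd
        exact h5 (by simp [List.nodup_append, hnd]; exact fun a ha hc => hy (hc ▸ ha))

def allT (ts : List (String × String × List String)) : List String :=
  ts.flatMap (fun t => t.2.2)

theorem tget_subset_allT {ts : List (String × String × List String)} {s sym x : String}
    (h : x ∈ tget ts s sym) : x ∈ allT ts := by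
  induction ts with
  | nil => simp [tget] at h
  | cons t r ih =>
    obtain ⟨a, b, v⟩ := t
    simp only [tget] at h
    by_cases hc : a = s ∧ b = sym
    · rw [if_pos hc] at h; exact List.mem_flatMap.mpr ⟨(a,b,v), List.mem_cons_self, h⟩
    · rw [if_neg hc] at h
      have := ih h
      simp only [allT, List.flatMap_cons] at *
      exact List.mem_append_right _ this

theorem foldO_spec (ts : List (String × String × List String)) (l : List String) :
    ∀ (acc : List String × Bool), ∃ d : List String,
    (l.foldl (fun acc st => (tget ts st "EPSILON").foldl stepA1 acc) acc).1 = acc.1 ++ d ∧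
    (l.foldl (fun acc st => (tget ts st "EPSILON").foldl stepA1 acc) acc).2 = (acc.2 || !d.isEmpty) ∧
    (∀ x ∈ d, (∃ s ∈ l, x ∈ tget ts s "EPSILON") ∧ x ∉ acc.1) ∧
    (∀ s ∈ l, ∀ t ∈ tget ts s "EPSILON", t ∈ (l.foldl (fun acc st => (tget ts st "EPSILON").foldl stepA1 acc) acc).1) ∧
    (acc.1.Nodup → (l.foldl (fun acc st => (tget ts st "EPSILON").foldl stepA1 acc) acc).1.Nodup) := by
  induction l with
  | nil => intro acc; exact ⟨[], by simp, by simp, by simp, by simp, by simp⟩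
  | cons s l ih =>
    intro acc
    simp only [List.foldl_cons]
    obtain ⟨d1, g1, g2, g3, g4, g5⟩ := fold1_spec (tget ts s "EPSILON") acc
    obtain ⟨d2, h1, h2, h3, h4, h5⟩ := ih ((tget ts s "EPSILON").foldl stepA1 acc)
    refine ⟨d1 ++ d2, ?_, ?_, ?_, ?_, ?_⟩
    · rw [h1, g1, List.append_assoc]
    · rw [h2, g2]; cases d1 <;> cases d2 <;> cases acc.2 <;> simp
    · intro x hx
      rcases List.mem_append.mp hx with hx | hx
      · exact ⟨⟨s, List.mem_cons_self, (g3 x hx).1⟩, (g3 x hx).2⟩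
      · obtain ⟨⟨s', hs', hx'⟩, hnot⟩ := h3 x hx
        refine ⟨⟨s', List.mem_cons_of_mem _ hs', hx'⟩, fun hc => hnot ?_⟩
        rw [g1]; exact List.mem_append_left _ hc
    · intro s' hs' t ht
      rcases List.mem_cons.mp hs' with rfl | hs'
      · rw [h1]; exact List.mem_append_left _ (g4 t ht)
      · exact h4 s' hs' t ht
    · intro hnd; exact h5 (g5 hnd)

theorem length_filter_lt {α : Type} (L : List α) (p q : α → Bool) (himp : ∀ a, q a = true → p a = true)
    (e : α) (heL : e ∈ L) (hep : p e = true) (heq : q e = false) :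
    (L.filter q).length < (L.filter p).length := by
  have mono : ∀ (M : List α), (M.filter q).length ≤ (M.filter p).length := by
    intro M
    rw [← List.countP_eq_length_filter, ← List.countP_eq_length_filter]
    exact List.countP_mono_left (fun a _ => himp a)
  induction L with
  | nil => simp at heL
  | cons a L ih =>
    rcases List.mem_cons.mp heL with rfl | ha
    · have := mono L
      simp only [List.filter_cons, hep, heq]
      simp only [Bool.false_eq_true, if_false, if_true, List.length_cons]
      omega
    · have hlt := ih ha
      by_cases hqa : q a = true
      · simp only [List.filter_cons, hqa, himp a hqa]; simpa using hlt
      · have : q a = false := by revert hqa; cases q a <;> simp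
        simp only [List.filter_cons, this]
        by_cases hpa : p a = true
        · simp only [hpa]; simp; omega
        · have : p a = false := by revert hpa; cases p a <;> simp
          simp only [this]; simpa using hlt

theorem count_split {L d : List String} {p : String → Bool} (hL : L.Nodup) (hd : d.Nodup)
    (hsub : ∀ x ∈ d, x ∈ L) (hp : ∀ x ∈ d, p x = true) :
    (L.filter (fun x => p x && !(decide (x ∈ d)))).length + d.length ≤ (L.filter p).length := by
  have hsplit := List.length_eq_length_filter_add (l := L.filter p) (fun x => decide (x ∈ d))
  have e1 : ((L.filter p).filter (fun x => decide (x ∈ d))).length = d.length := by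
    refine (List.perm_ext_iff_of_nodup ((hL.filter _).filter _) hd |>.mpr ?_).length_eq
    intro x
    simp only [List.mem_filter, decide_eq_true_eq]
    constructor
    · rintro ⟨⟨-, -⟩, hx⟩; exact hx
    · intro hx; exact ⟨⟨hsub x hx, hp x hx⟩, hx⟩
  have e2 : L.filter (fun x => p x && !(decide (x ∈ d))) = (L.filter p).filter (fun x => !(decide (x ∈ d))) := by
    rw [List.filter_filter]
    exact List.filter_congr (fun a _ => Bool.and_comm _ _)
  rw [e2]
  omega

inductive Reach (ts : List (String × String × List String)) (S : List String) : String → Prop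
  | base {x : String} : x ∈ S → Reach ts S x
  | step {x y : String} : Reach ts S x → y ∈ tget ts x "EPSILON" → Reach ts S y

theorem reach_congr {ts : List (String × String × List String)} {S S' : List String}
    (h : ∀ x, x ∈ S ↔ x ∈ S') (x : String) : Reach ts S x ↔ Reach ts S' x := by
  constructor
  · intro hr
    induction hr with
    | base hx => exact Reach.base ((h _).mp hx)
    | step _ hy ih => exact Reach.step ih hy
  · intro hr
    induction hr with
    | base hx => exact Reach.base ((h _).mpr hx)
    | step _ hy ih => exact Reach.step ih hy

theorem reach_absorb {ts : List (String × String × List String)} {S S' : List String}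
    (hsub : ∀ x ∈ S, x ∈ S') (hback : ∀ y ∈ S', Reach ts S y) (x : String) :
    Reach ts S' x ↔ Reach ts S x := by
  constructor
  · intro hr
    induction hr with
    | base hx => exact hback _ hx
    | step _ hy ih => exact Reach.step ih hy
  · intro hr
    induction hr with
    | base hx => exact Reach.base (hsub _ hx)
    | step _ hy ih => exact Reach.step ih hy

theorem reach_closed {ts : List (String × String × List String)} {S : List String}
    (hcl : ∀ s ∈ S, ∀ t ∈ tget ts s "EPSILON", t ∈ S) (x : String) :
    Reach ts S x ↔ x ∈ S := by
  constructor
  · intro hr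
    induction hr with
    | base hx => exact hx
    | step _ hy ih => exact hcl _ ih _ hy
  · exact Reach.base

theorem passA_eq (ts : List (String × String × List String)) (R : List String) :
    passA ts R = R.foldl (fun acc st => (tget ts st "EPSILON").foldl stepA1 acc) (R, false) := rfl

theorem closeA_mem {ts : List (String × String × List String)} :
    ∀ (fuel : Nat) (R : List String), R.Nodup →
    ((PySem.List.dedup (allT ts)).filter (fun y => !(decide (y ∈ R)))).length < fuel →
    ∀ x, (x ∈ closeA ts fuel R ↔ Reach ts R x) := by
  intro fuel
  induction fuel with
  | zero => intro R _ h; omega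
  | succ fuel ih =>
    intro R hnd hfuel x
    obtain ⟨d, h1, h2, h3, h4, h5⟩ := foldO_spec ts R (R, false)
    rw [← passA_eq] at h1 h2 h4 h5
    simp only at h1 h2 h3 h5
    simp only [closeA]
    cases hd : d with
    | nil =>
      subst hd
      have hflag : (passA ts R).2 = false := by rw [h2]; rfl
      rw [if_neg (by simp [hflag])]
      have hR : (passA ts R).1 = R := by rw [h1]; simp
      rw [hR]
      exact (reach_closed (fun s hs t ht => hR ▸ h4 s hs t ht) x).symm
    | cons e d' =>
      subst hd
      have hflag : (passA ts R).2 = true := by rw [h2]; rfl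
      rw [if_pos (by simp [hflag])]
      have hsubR : ∀ y ∈ R, y ∈ (passA ts R).1 := by
        intro y hy; rw [h1]; exact List.mem_append_left _ hy
      have heP : e ∈ (passA ts R).1 := by
        rw [h1]; exact List.mem_append_right _ List.mem_cons_self
      have he3 := h3 e List.mem_cons_self
      have heT : e ∈ PySem.List.dedup (allT ts) := by
        obtain ⟨⟨s, _, hs⟩, _⟩ := he3
        simpa [PySem.List.mem_dedup] using tget_subset_allT hs
      have hmlt : ((PySem.List.dedup (allT ts)).filter (fun y => !(decide (y ∈ (passA ts R).1)))).length
          < ((PySem.List.dedup (allT ts)).filter (fun y => !(decide (y ∈ R)))).length := by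
        refine length_filter_lt _ _ _ ?_ e heT (by simp [he3.2]) (by simp [heP])
        intro a ha
        simp only [Bool.not_eq_eq_eq_not, Bool.not_true, decide_eq_false_iff_not] at *
        exact fun hc => ha (hsubR a hc)
      have hback : ∀ y ∈ (passA ts R).1, Reach ts R y := by
        intro y hy
        rw [h1] at hy
        rcases List.mem_append.mp hy with hy | hy
        · exact Reach.base hy
        · obtain ⟨⟨s, hsR, hst⟩, -⟩ := h3 y hy
          exact Reach.step (Reach.base hsR) hst
      rw [ih (passA ts R).1 (h5 hnd) (by omega) x]
      exact reach_absorb hsubR hback x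

theorem closeB_mem {ts : List (String × String × List String)} :
    ∀ (fuel : Nat) (stack seen : List String), seen.Nodup → (∀ y ∈ stack, y ∈ seen) →
    (∀ y ∈ seen, y ∈ stack ∨ ∀ t ∈ tget ts y "EPSILON", t ∈ seen) →
    stack.length + ((PySem.List.dedup (allT ts)).filter (fun y => !(decide (y ∈ seen)))).length < fuel →
    ∀ x, (x ∈ closeB ts fuel stack seen ↔ Reach ts seen x) := by
  intro fuel
  induction fuel with
  | zero => intro stack seen _ _ _ h; omega
  | succ fuel ih =>
    intro stack seen hnd hsub hinv hfuel x
    rcases hlast : stack.getLast? with _ | s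
    · have hstack : stack = [] := List.getLast?_eq_none_iff.mp hlast
      subst hstack
      simp only [closeB, hlast]
      refine (reach_closed ?_ x).symm
      intro y hy t ht
      rcases hinv y hy with h | h
      · simp at h
      · exact h t ht
    · have hdecomp : stack.dropLast ++ [s] = stack := List.dropLast_append_getLast? s hlast
      have hsseen : s ∈ seen := hsub s (by rw [← hdecomp]; exact List.mem_append_right _ List.mem_cons_self)
      obtain ⟨d, h1, h2, h3, h4, h5⟩ := fold2_spec (tget ts s "EPSILON") (stack.dropLast, seen)
      simp only at h1 h2 h3 h4 h5
      rw [← hdecomp] at hfuel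
      simp only [closeB, hlast]
      have hndseen' : (seen ++ d).Nodup := by rw [← h2]; exact h5 hnd
      have hdnd : d.Nodup := hndseen'.of_append_right
      have hdsub : ∀ y ∈ d, y ∈ PySem.List.dedup (allT ts) := by
        intro y hy
        simpa [PySem.List.mem_dedup] using tget_subset_allT (h3 y hy).1
      have hdnotseen : ∀ y ∈ d, y ∉ seen := fun y hy => (h3 y hy).2
      have hcount := count_split (PySem.List.nodup_dedup (allT ts)) hdnd hdsub
          (p := fun y => !(decide (y ∈ seen))) (by intro x hx; simp [hdnotseen x hx])
      have hpt : List.filter (fun y => !(decide (y ∈ seen ++ d))) (PySem.List.dedup (allT ts))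
          = List.filter (fun y => !(decide (y ∈ seen)) && !(decide (y ∈ d))) (PySem.List.dedup (allT ts)) := by
        refine List.filter_congr ?_
        intro a _
        by_cases ha : a ∈ seen <;> by_cases hb : a ∈ d <;> simp [ha, hb, List.mem_append]
      have hmem := ih ((tget ts s "EPSILON").foldl stepB1 (stack.dropLast, seen)).1
          ((tget ts s "EPSILON").foldl stepB1 (stack.dropLast, seen)).2
          (h5 hnd) ?_ ?_ ?_ x
      · rw [show (fun (q : List String × List String) t => if t ∈ q.2 then q else (q.1 ++ [t], q.2 ++ [t])) = stepB1 from rfl]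
        rw [hmem, h2]
        refine reach_absorb (fun y hy => List.mem_append_left _ hy) ?_ x
        intro y hy
        rcases List.mem_append.mp hy with hy | hy
        · exact Reach.base hy
        · exact Reach.step (Reach.base hsseen) (h3 y hy).1
      · intro y hy
        rw [h1] at hy
        rw [h2]
        rcases List.mem_append.mp hy with hy | hy
        · exact List.mem_append_left _ (hsub y (by rw [← hdecomp]; exact List.mem_append_left _ hy))
        · exact List.mem_append_right _ hy
      · intro y hy
        rw [h2] at hy
        rcases List.mem_append.mp hy with hy | hy
        · rcases hinv y hy with hys | hcl
          · rw [← hdecomp] at hys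
            rcases List.mem_append.mp hys with hys | hys
            · left; rw [h1]; exact List.mem_append_left _ hys
            · right
              have : y = s := by simpa using hys
              subst this
              exact h4
          · right; intro t ht; rw [h2]; exact List.mem_append_left _ (hcl t ht)
        · left; rw [h1]; exact List.mem_append_right _ hy
      · rw [h1, h2, hpt]
        simp only [List.length_append] at *
        simp only [List.length_cons, List.length_nil] at hfuel
        omega

theorem mem_fold_update {f : String → List String} :
    ∀ (l : List String) (m0 : List String) (x : String),
    (x ∈ l.foldl (fun m s => PySem.Set.update m (f s)) m0 ↔ x ∈ m0 ∨ ∃ s ∈ l, x ∈ f s) := by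
  intro l
  induction l with
  | nil => simp
  | cons a l ih =>
    intro m0 x
    rw [List.foldl_cons, ih]
    simp [PySem.Set.mem_update]
    tauto

theorem nodup_fold_update {f : String → List String} :
    ∀ (l m0 : List String), m0.Nodup → (l.foldl (fun m s => PySem.Set.update m (f s)) m0).Nodup := by
  intro l
  induction l with
  | nil => intro m0 h; exact h
  | cons a l ih => intro m0 h; exact ih _ (PySem.Set.nodup_update m0 (f a) h)

theorem measure_le (ts : List (String × String × List String)) (p : String → Bool) :
    ((PySem.List.dedup (allT ts)).filter p).length ≤ (allT ts).length := by
  refine le_trans (List.length_filter_le _ _) ?_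
  rw [PySem.List.dedup_eq_ofList]
  exact PySem.Set.length_ofList_le _

def stepAF (ts : List (String × String × List String)) : List String → Char → List String :=
  fun cur c =>
    let nxt := cur.foldl
      (fun ns s => (tget ts s (Char.toString c)).foldl (fun ns t => PySem.Set.add ns t) ns)
      ([] : List String)
    closeA ts (pvFuel ts) (PySem.Set.ofList nxt)

def stepBF (ts : List (String × String × List String)) : List String → Char → List String :=
  fun cur c =>
    let moved := cur.foldl
      (fun m s => PySem.Set.update m (tget ts s (Char.toString c)))
      ([] : List String)
    closeB ts (moved.length + pvFuel ts) moved moved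

theorem step_one (ts : List (String × String × List String)) (c : Char) {cA cB : List String}
    (h : ∀ x, x ∈ cA ↔ x ∈ cB) :
    ∀ x, x ∈ stepAF ts cA c ↔ x ∈ stepBF ts cB c := by
  have eqAB : stepAF ts cA c = closeA ts (pvFuel ts)
      (PySem.Set.ofList (cA.foldl (fun m s => PySem.Set.update m (tget ts s (Char.toString c))) [])) := rfl
  set f : String → List String := fun s => tget ts s (Char.toString c) with hf
  set nxtA : List String := cA.foldl (fun m s => PySem.Set.update m (f s)) [] with hnxtA
  set nxtB : List String := cB.foldl (fun m s => PySem.Set.update m (f s)) [] with hnxtB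
  have hnA : nxtA.Nodup := nodup_fold_update _ _ List.nodup_nil
  have hnB : nxtB.Nodup := nodup_fold_update _ _ List.nodup_nil
  have hmAB : ∀ x, x ∈ nxtA ↔ x ∈ nxtB := by
    intro x
    rw [hnxtA, hnxtB, mem_fold_update, mem_fold_update]
    constructor
    · rintro (hx | ⟨s, hs, hx⟩)
      · simp at hx
      · exact Or.inr ⟨s, (h s).mp hs, hx⟩
    · rintro (hx | ⟨s, hs, hx⟩)
      · simp at hx
      · exact Or.inr ⟨s, (h s).mpr hs, hx⟩
  have hofA : PySem.Set.ofList nxtA = nxtA := PySem.Set.ofList_eq_self_of_nodup nxtA hnA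
  have hAmem : ∀ x, x ∈ stepAF ts cA c ↔ Reach ts nxtA x := by
    intro x
    rw [eqAB, hofA]
    exact closeA_mem (pvFuel ts) nxtA hnA
      (lt_of_le_of_lt (measure_le ts _) (Nat.lt_succ_self _)) x
  have hBmem : ∀ x, x ∈ stepBF ts cB c ↔ Reach ts nxtB x := by
    intro x
    refine closeB_mem _ nxtB nxtB hnB (fun y hy => hy) (fun y hy => Or.inl hy) ?_ x
    have := measure_le ts (fun y => !(decide (y ∈ nxtB)))
    simp only [show (List.foldl (fun m s => PySem.Set.update m (tget ts s (Char.toString c))) ([] : List String) cB) = nxtB from rfl]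
    simp only [pvFuel, allT] at *
    omega
  intro x
  rw [hAmem, hBmem]
  exact reach_congr hmAB x

theorem loop_inv (ts : List (String × String × List String)) :
    ∀ (L : List Char) (cA cB : List String), (∀ x, x ∈ cA ↔ x ∈ cB) →
    (∀ x, x ∈ L.foldl (stepAF ts) cA ↔ x ∈ L.foldl (stepBF ts) cB) := by
  intro L
  induction L with
  | nil => intro cA cB h; exact h
  | cons c L ih =>
    intro cA cB h
    simp only [List.foldl_cons]
    exact ih _ _ (step_one ts c h)

theorem any_eq {u v acc : List String} (h : ∀ x, x ∈ u ↔ x ∈ v) :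
    u.any (fun s => acc.contains s) = acc.any (fun s => v.contains s) := by
  rw [Bool.eq_iff_iff]
  simp only [List.any_eq_true, List.contains_iff_mem]
  constructor
  · rintro ⟨s, hsu, hsa⟩; exact ⟨s, hsa, (h s).mp hsu⟩
  · rintro ⟨s, hsa, hsv⟩; exact ⟨s, (h s).mpr hsv, hsa⟩

theorem main_eq (inp st : String) (acc : List String) (ts : List (String × String × List String)) :
    validate_string inp st acc ts = validate_string_alt inp st acc ts := by
  have e1 : validate_string inp st acc ts =
      (inp.toList.foldl (stepAF ts) (closeA ts (pvFuel ts) (PySem.Set.ofList [st]))).any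
        (fun s => acc.contains s) := rfl
  have e2 : validate_string_alt inp st acc ts =
      acc.any (fun s => (inp.toList.foldl (stepBF ts)
        (closeB ts ((PySem.Set.ofList [st]).length + pvFuel ts)
          (PySem.Set.ofList [st]) (PySem.Set.ofList [st]))).contains s) := rfl
  rw [e1, e2]
  refine any_eq (loop_inv ts inp.toList _ _ ?_)
  have hnd : ([st] : List String).Nodup := by simp
  have hof : PySem.Set.ofList [st] = [st] := PySem.Set.ofList_eq_self_of_nodup _ hnd
  intro x
  rw [hof, closeA_mem (pvFuel ts) [st] hnd (lt_of_le_of_lt (measure_le ts _) (Nat.lt_succ_self _)) x,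
      closeB_mem _ [st] [st] hnd (fun y hy => hy) (fun y hy => Or.inl hy) ?_ x]
  have := measure_le ts (fun y => !(decide (y ∈ ([st] : List String))))
  simp only [pvFuel, allT, List.length_cons, List.length_nil] at *
  omega

-- ===== VERDICT (by name: the statement is the Claim_ definition above) =====
theorem validate_string_spec : Claim_equal_validate_string := by
  unfold Claim_equal_validate_string Spec_validate_string
  intro inp st acc ts _
  exact main_eq inp st acc ts
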